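-- pv_equiv track=rewrite | github.com/daseguratud/MethodologyForVerifyingSyllabusRelevance | TextProcessor.py | CleanPunctuationFromText
-- ===== SOURCE A (Python) =====
-- def CleanPunctuationFromText(text):
--     punctuationMarks = [
--         ".", ",", ";", ":", "!", "¡", "?", "¿",
--         "'", '"', "(", ")", "[", "]", "{", "}",
--         "-", "_", "/", "\\", "|",
--         "@", "#", "$", "%", "&", "*", "+", "=",
--         "<", ">", "^", "~", "`"
--     ]
--     textResult=text
--     for mark in punctuationMarks:
--         textResult=textResult.replace(mark," ")
--     return textResult
-- ===== SOURCE B (Python) =====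
-- PUNCT = set(".,;:!\u00a1?\u00bf'\"()[]{}-_/\\|@#$%&*+=<>^~`")
--
-- def CleanPunctuationFromText(text):
--     return "".join(" " if ch in PUNCT else ch for ch in text)
-- ===== Notes on version B (the rewrite author's own statement) =====
-- stated objective: alternative
-- what changed: Single pass over the characters with a punctuation-set membership test (emit ' ' for punctuation, the char otherwise), instead of 34 sequential full-string str.replace passes.
import Mathlib
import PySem

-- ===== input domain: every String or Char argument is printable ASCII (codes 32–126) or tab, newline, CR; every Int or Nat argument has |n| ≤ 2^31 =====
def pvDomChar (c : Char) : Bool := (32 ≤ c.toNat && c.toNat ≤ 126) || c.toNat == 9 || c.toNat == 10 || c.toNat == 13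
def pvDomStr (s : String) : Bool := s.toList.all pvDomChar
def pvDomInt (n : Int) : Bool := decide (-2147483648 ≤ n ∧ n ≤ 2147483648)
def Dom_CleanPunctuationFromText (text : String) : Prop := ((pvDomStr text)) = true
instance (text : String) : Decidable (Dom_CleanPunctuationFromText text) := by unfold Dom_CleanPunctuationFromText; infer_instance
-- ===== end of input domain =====

-- B replaces A's 34 sequential full-string replace passes with a single pass over
-- the characters and a punctuation-set membership test (objective: alternative).


-- ===== PORT A =====
def CleanPunctuationFromText (text : String) : String :=
  let punctuationMarks : List String :=
    [".", ",", ";", ":", "!", "¡", "?", "¿",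
     "'", "\"", "(", ")", "[", "]", "{", "}",
     "-", "_", "/", "\\", "|",
     "@", "#", "$", "%", "&", "*", "+", "=",
     "<", ">", "^", "~", "`"]
  punctuationMarks.foldl (fun textResult mark => PySem.Str.replace textResult mark " ") text

-- ===== PORT B =====
def punctChars : List Char :=
  ['.', ',', ';', ':', '!', '¡', '?', '¿',
   '\'', '"', '(', ')', '[', ']', '{', '}',
   '-', '_', '/', '\\', '|',
   '@', '#', '$', '%', '&', '*', '+', '=',
   '<', '>', '^', '~', '`']

def CleanPunctuationFromText_alt (text : String) : String :=
  String.ofList (text.toList.map (fun ch => if punctChars.contains ch then ' ' else ch))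

-- ===== PRECONDITION & SPEC =====
def Spec_CleanPunctuationFromText (text : String) (out : String) : Prop := out = CleanPunctuationFromText_alt text
instance (text : String) (out : String) : Decidable (Spec_CleanPunctuationFromText text out) := by unfold Spec_CleanPunctuationFromText; infer_instance

-- ===== CLAIM (what is proved, stated in full; the proofs are below) =====
def Claim_equal_CleanPunctuationFromText : Prop := ∀ (text : String), Dom_CleanPunctuationFromText text → Spec_CleanPunctuationFromText text (CleanPunctuationFromText text)

-- ===== LEMMAS AND PROOFS =====

-- replacing a single-character pattern by ' ' is a character map (go-level)
theorem replace_go_single (m : Char) (l : List Char) (fuel : Nat) (acc : List Char)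
    (h : l.length ≤ fuel) :
    PySem.Chars.replace.go [m] [' '] fuel l acc
      = acc.reverse ++ l.map (fun c => if c = m then ' ' else c) := by
  induction l generalizing fuel acc with
  | nil =>
    cases fuel <;> simp [PySem.Chars.replace.go]
  | cons c t ih =>
    cases fuel with
    | zero => simp at h
    | succ fuel =>
      simp only [PySem.Chars.replace.go]
      by_cases hc : c = m
      · subst hc
        simp only [List.isPrefixOf, BEq.rfl, Bool.true_and, List.isPrefixOf_nil_left,
          if_pos, List.length_cons, List.length_nil, List.drop_succ_cons, List.drop_zero]
        rw [ih _ _ (by simpa using Nat.le_of_succ_le_succ h)]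
        simp
      · have : ([m].isPrefixOf (c :: t)) = false := by
          simp [List.isPrefixOf]
          exact fun h' => absurd h'.symm hc
        rw [this]
        simp only [Bool.false_eq_true, if_false]
        rw [ih _ _ (by simpa using Nat.le_of_succ_le_succ h)]
        simp [hc]

theorem replace_single (m : Char) (s : List Char) :
    PySem.Chars.replace s [m] [' '] = s.map (fun c => if c = m then ' ' else c) := by
  rw [PySem.Chars.replace]
  simp only [List.isEmpty_cons, Bool.false_eq_true, if_false]
  rw [replace_go_single m s s.length [] le_rfl]
  simp

-- folding single-character replaces = mapping the folded per-character function
theorem foldl_replace_map (ms : List Char) (s : List Char) :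
    List.foldl (fun r m => PySem.Chars.replace r [m] [' ']) s ms
      = s.map (fun c => ms.foldl (fun x m => if x = m then ' ' else x) c) := by
  induction ms generalizing s with
  | nil => simp
  | cons m rest ih =>
    simp only [List.foldl_cons]
    rw [replace_single, ih, List.map_map]
    rfl

-- the per-character fold is a membership test, provided ' ' is not a mark
theorem foldl_char_contains (ms : List Char) (c : Char) (h : ' ' ∉ ms) :
    ms.foldl (fun x m => if x = m then ' ' else x) c
      = if ms.contains c then ' ' else c := by
  induction ms generalizing c with
  | nil => simp
  | cons m rest ih =>
    simp only [List.foldl_cons, List.contains_cons]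
    have hrest : ' ' ∉ rest := fun hr => h (List.mem_cons_of_mem _ hr)
    by_cases hc : c = m
    · subst hc
      rw [if_pos rfl, ih _ hrest]
      have : ' ' ∉ rest := hrest
      simp [List.contains_eq_mem, this]
    · rw [if_neg hc, ih _ hrest]
      simp [List.contains_eq_mem, hc]

-- lifting the string-level fold of A to the character level
theorem foldl_str_replace (ms : List String) (s : String) :
    (List.foldl (fun r mk => PySem.Str.replace r mk " ") s ms).toList
      = List.foldl (fun r mk => PySem.Chars.replace r mk [' ']) s.toList (ms.map String.toList) := by
  induction ms generalizing s with
  | nil => simp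
  | cons m rest ih =>
    simp only [List.map_cons, List.foldl_cons]
    rw [ih]
    simp [PySem.Str.replace]

-- ===== VERDICT (by name: the statement is the Claim_ definition above) =====
set_option maxRecDepth 8000 in
theorem CleanPunctuationFromText_spec : Claim_equal_CleanPunctuationFromText := by
  intro text _
  show CleanPunctuationFromText text = CleanPunctuationFromText_alt text
  have hlist : (([".", ",", ";", ":", "!", "¡", "?", "¿",
     "'", "\"", "(", ")", "[", "]", "{", "}",
     "-", "_", "/", "\\", "|",
     "@", "#", "$", "%", "&", "*", "+", "=",
     "<", ">", "^", "~", "`"] : List String).map String.toList)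
      = punctChars.map (fun m => [m]) := by rfl
  have hsp : ' ' ∉ punctChars := by decide
  unfold CleanPunctuationFromText CleanPunctuationFromText_alt
  have h := foldl_str_replace
    [".", ",", ";", ":", "!", "¡", "?", "¿",
     "'", "\"", "(", ")", "[", "]", "{", "}",
     "-", "_", "/", "\\", "|",
     "@", "#", "$", "%", "&", "*", "+", "=",
     "<", ">", "^", "~", "`"] text
  rw [hlist, List.foldl_map, foldl_replace_map] at h
  have h2 : ∀ r : String, String.ofList r.toList = r := by simp
  calc _ = String.ofList (List.foldl (fun r mk => PySem.Str.replace r mk " ") text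
            [".", ",", ";", ":", "!", "¡", "?", "¿",
             "'", "\"", "(", ")", "[", "]", "{", "}",
             "-", "_", "/", "\\", "|",
             "@", "#", "$", "%", "&", "*", "+", "=",
             "<", ">", "^", "~", "`"]).toList := (h2 _).symm
    _ = _ := by
        rw [h]
        exact congrArg String.ofList
          (List.map_congr_left (fun c _ => foldl_char_contains punctChars c hsp))
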